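-- pv_equiv track=rewrite | github.com/paranoidandroid2124/ko-finance | parse/table_extraction.py | _fill_header_matrix
-- ===== SOURCE A (Python) =====
-- from typing import Any, Dict, Iterable, List, Optional, Sequence, Tuple
--
-- def _fill_header_matrix(rows: Sequence[Sequence[str]], width: int) -> List[List[str]]:
--     matrix: List[List[str]] = []
--     for row in rows:
--         padded = list(row) + [""] * (width - len(row))
--         carried: List[str] = []
--         last = ""
--         for cell in padded:
--             normalized = cell.strip()
--             if normalized:
--                 last = normalized
--                 carried.append(normalized)
--             else:
--                 carried.append(last)
--         matrix.append(carried)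
--
--     for col in range(width):
--         last_value = ""
--         for row_idx, row in enumerate(matrix):
--             cell = row[col]
--             if cell:
--                 last_value = cell
--             else:
--                 row[col] = last_value
--     return matrix
-- ===== SOURCE B (Python) =====
-- def _fill_header_matrix(rows, width):
--     col_last = [""] * max(width, 0)
--     result = []
--     for row in rows:
--         filled = []
--         last = ""
--         for cell in list(row) + [""] * (width - len(row)):
--             normalized = cell.strip()
--             if normalized:
--                 last = normalized
--                 filled.append(normalized)
--             else:
--                 filled.append(last)
--         for c in range(len(col_last)):
--             if filled[c]:
--                 col_last[c] = filled[c]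
--             else:
--                 filled[c] = col_last[c]
--         result.append(filled)
--     return result
-- ===== Notes on version B (the rewrite author's own statement) =====
-- stated objective: alternative
-- what changed: A fills rows horizontally into a matrix and then runs a second column-major pass (column by column, re-scanning all rows per column) to fill downward; B makes one top-to-bottom row pass that threads a per-column carry array col_last, so the separate column re-scan of the matrix disappears.
import Mathlib
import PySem

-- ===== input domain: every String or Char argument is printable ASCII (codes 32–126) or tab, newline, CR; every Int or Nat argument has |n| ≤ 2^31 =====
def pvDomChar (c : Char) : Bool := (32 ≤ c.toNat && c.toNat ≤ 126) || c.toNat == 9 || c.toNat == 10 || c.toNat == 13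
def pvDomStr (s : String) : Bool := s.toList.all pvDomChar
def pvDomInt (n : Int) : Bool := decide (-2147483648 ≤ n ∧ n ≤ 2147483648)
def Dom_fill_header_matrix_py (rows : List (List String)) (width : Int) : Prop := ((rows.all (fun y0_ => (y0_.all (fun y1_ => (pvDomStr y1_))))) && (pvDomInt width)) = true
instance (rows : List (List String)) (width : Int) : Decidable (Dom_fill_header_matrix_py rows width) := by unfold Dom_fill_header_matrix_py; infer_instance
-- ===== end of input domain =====

-- B fuses A's two phases (horizontal fill of each row, then a separate column-major
-- vertical pass over the whole matrix) into one top-to-bottom row pass that threads a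
-- per-column carry array; objective: alternative decomposition (same asymptotic cost).

-- ===== PORT A =====
-- horizontal phase of A: pad the row to `width` with "" (Python's [""]*(width-len(row))
-- is empty for a non-positive count, matching .toNat), then carry the last non-empty
-- stripped cell. This inner loop appears verbatim in both Pythons, so both ports share it.
def hfillRow (width : Int) (row : List String) : List String :=
  let padded := row ++ List.replicate (width - (row.length : Int)).toNat ""
  (padded.foldl (fun (p : List String × String) cell =>
      let normalized := PySem.Str.strip cell
      if normalized ≠ "" then (p.1 ++ [normalized], normalized)
      else (p.1 ++ [p.2], p.2)) ([], "")).1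

-- A's inner vertical loop for one column: walk the rows carrying `last_value`.
-- row.getD col "" transliterates row[col]: inside A every matrix row has length ≥ width > col,
-- so the index is always in range and Python never raises here.
def fillColumn (last_value : String) (col : Nat) : List (List String) → List (List String)
  | [] => []
  | row :: rest =>
    let cell := row.getD col ""
    if cell ≠ "" then row :: fillColumn cell col rest
    else row.set col last_value :: fillColumn last_value col rest

-- Python range(width) is empty for width ≤ 0, matching width.toNat.
def fill_header_matrix_py (rows : List (List String)) (width : Int) : List (List String) :=
  let matrix := rows.map (hfillRow width)
  (List.range width.toNat).foldl (fun m col => fillColumn "" col m) matrix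

-- ===== PORT B =====
-- B's per-row vertical step: walk `filled` and `col_last` in lockstep; a non-empty cell
-- updates the carry, an empty one is replaced by it.  (In B `filled` is never shorter
-- than `col_last`; the short-`filled` case is the natural total completion.)
def vertRow : List String → List String → List String × List String
  | fs, [] => (fs, [])
  | [], l :: ls => ([], l :: ls)
  | f :: fs, l :: ls =>
    let r := vertRow fs ls
    if f ≠ "" then (f :: r.1, f :: r.2) else (l :: r.1, l :: r.2)

def fill_header_matrix_py_alt (rows : List (List String)) (width : Int) : List (List String) :=
  (rows.foldl (fun (p : List (List String) × List String) row =>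
      let filled := hfillRow width row
      let r := vertRow filled p.2
      (p.1 ++ [r.1], r.2)) ([], List.replicate (max width 0).toNat "")).1

-- ===== PRECONDITION & SPEC =====
def Spec_fill_header_matrix_py (rows : List (List String)) (width : Int) (out : List (List String)) : Prop := out = fill_header_matrix_py_alt rows width
instance (rows : List (List String)) (width : Int) (out : List (List String)) : Decidable (Spec_fill_header_matrix_py rows width out) := by unfold Spec_fill_header_matrix_py; infer_instance

-- ===== CLAIM (what is proved, stated in full; the proofs are below) =====
def Claim_equal_fill_header_matrix_py : Prop := ∀ (rows : List (List String)) (width : Int), Dom_fill_header_matrix_py rows width → Spec_fill_header_matrix_py rows width (fill_header_matrix_py rows width)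

-- ===== LEMMAS AND PROOFS =====

-- B's row pass written as structural recursion over the already-hfilled matrix.
def mid : List (List String) → List String → List (List String)
  | [], _ => []
  | r :: M, cl => (vertRow r cl).1 :: mid M (vertRow r cl).2

-- A's column loop over a list of (initial carry, column index) pairs.
def applyCols (ps : List (String × Nat)) (M : List (List String)) : List (List String) :=
  ps.foldl (fun m p => fillColumn p.1 p.2 m) M

-- effect of one column pass on a single (head) row, and the carry it leaves behind
def hstep (r : List String) (p : String × Nat) : List String :=
  if r[p.2]?.getD "" = "" then r.set p.2 p.1 else r

def cstep (r : List String) (p : String × Nat) : String × Nat :=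
  (if r[p.2]?.getD "" = "" then p.1 else r[p.2]?.getD "", p.2)

-- effect of the whole column loop on the head row / the carries it leaves for the rest
def hfold (ps : List (String × Nat)) (r : List String) : List String := ps.foldl hstep r

def carryUpd (ps : List (String × Nat)) (r : List String) : List (String × Nat) := ps.map (cstep r)

theorem vertRow_nil_left (ls : List String) : vertRow [] ls = ([], ls) := by
  cases ls <;> rfl

theorem vertRow_cons (f : String) (fs : List String) (l : String) (ls : List String) :
    vertRow (f :: fs) (l :: ls) =
      (if f ≠ "" then (f :: (vertRow fs ls).1, f :: (vertRow fs ls).2)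
       else (l :: (vertRow fs ls).1, l :: (vertRow fs ls).2)) := rfl

theorem applyCols_nil (ps : List (String × Nat)) : applyCols ps [] = [] := by
  induction ps with
  | nil => rfl
  | cons p ps ih => simpa [applyCols, fillColumn, List.foldl_cons] using ih

theorem zipIdx_pairwise (cl : List String) (i : Nat) :
    (cl.zipIdx i).Pairwise (fun p q => p.2 ≠ q.2) := by
  induction cl generalizing i with
  | nil => simp
  | cons a cl ih =>
    refine List.Pairwise.cons ?_ (ih (i + 1))
    intro q hq
    have := List.mem_zipIdx hq
    omega

theorem applyCols_cons (ps : List (String × Nat)) (r : List String) (M : List (List String))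
    (h : ps.Pairwise (fun p q => p.2 ≠ q.2)) :
    applyCols ps (r :: M) = hfold ps r :: applyCols (carryUpd ps r) M := by
  induction ps generalizing r M with
  | nil => rfl
  | cons p ps ih =>
    rcases List.pairwise_cons.mp h with ⟨hp, htl⟩
    have hcu : carryUpd ps (hstep r p) = carryUpd ps r := by
      unfold carryUpd
      refine List.map_congr_left ?_
      intro q hq
      unfold cstep hstep
      split
      · rw [List.getElem?_set_ne (hp q hq)]
      · rfl
    have hstep1 : fillColumn p.1 p.2 (r :: M) = hstep r p :: fillColumn (cstep r p).1 p.2 M := by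
      by_cases hc : r[p.2]?.getD "" = "" <;>
        simp [fillColumn, hstep, cstep, List.getD_eq_getElem?_getD, hc]
    calc applyCols (p :: ps) (r :: M)
        = applyCols ps (hstep r p :: fillColumn (cstep r p).1 p.2 M) := by
          show applyCols ps (fillColumn p.1 p.2 (r :: M)) = _
          rw [hstep1]
      _ = hfold ps (hstep r p) :: applyCols (carryUpd ps (hstep r p))
            (fillColumn (cstep r p).1 p.2 M) := ih _ _ htl
      _ = hfold (p :: ps) r :: applyCols (carryUpd (p :: ps) r) M := by rw [hcu]; rfl

theorem get_at_length (r0 : List String) (f : String) (rest : List String) :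
    (r0 ++ f :: rest)[r0.length]? = some f := by
  simp

theorem oob_steps (ps : List (String × Nat)) (r : List String)
    (h : ∀ p ∈ ps, r.length ≤ p.2) : hfold ps r = r ∧ carryUpd ps r = ps := by
  induction ps with
  | nil => exact ⟨rfl, rfl⟩
  | cons p ps ih =>
    have hp : r.length ≤ p.2 := h p (by simp)
    have hget : r[p.2]? = none := List.getElem?_eq_none hp
    have h1 : hstep r p = r := by
      simp [hstep, hget, List.set_eq_of_length_le hp]
    have h2 : cstep r p = p := by simp [cstep, hget]
    have := ih (fun q hq => h q (by simp [hq]))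
    constructor
    · show hfold ps (hstep r p) = r
      rw [h1]; exact this.1
    · show cstep r p :: carryUpd ps r = p :: ps
      rw [h2, this.2]

-- the column loop restricted to the head row / to the carries equals one vertRow step
theorem zip_step (cl : List String) (i : Nat) (r0 rest : List String) (hlen : r0.length = i) :
    hfold (cl.zipIdx i) (r0 ++ rest) = r0 ++ (vertRow rest cl).1 ∧
    carryUpd (cl.zipIdx i) (r0 ++ rest) = ((vertRow rest cl).2).zipIdx i := by
  induction cl generalizing i r0 rest with
  | nil => simp [hfold, carryUpd, vertRow]
  | cons l ls ih =>
    cases rest with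
    | nil =>
      have hoob : ∀ p ∈ (l :: ls).zipIdx i, (r0 ++ ([] : List String)).length ≤ p.2 := by
        intro p hp
        have := List.mem_zipIdx hp
        simp only [List.append_nil]
        omega
      have h := oob_steps _ _ hoob
      rw [h.1, h.2, vertRow_nil_left]
      simp
    | cons f rest =>
      subst hlen
      have hget : (r0 ++ f :: rest)[r0.length]? = some f := get_at_length r0 f rest
      by_cases hc : f = ""
      · subst hc
        have h1 : hstep (r0 ++ "" :: rest) (l, r0.length) = (r0 ++ [l]) ++ rest := by
          simp [hstep]
        have h2 : cstep (r0 ++ "" :: rest) (l, r0.length) = (l, r0.length) := by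
          simp [cstep]
        have ihL := (ih (r0.length + 1) (r0 ++ [l]) rest (by simp)).1
        have ihC := (ih (r0.length + 1) (r0 ++ [""]) rest (by simp)).2
        have hrw : (r0 ++ [("" : String)]) ++ rest = r0 ++ "" :: rest := by simp
        rw [hrw] at ihC
        constructor
        · show hfold (ls.zipIdx (r0.length + 1)) (hstep (r0 ++ "" :: rest) (l, r0.length)) = _
          rw [h1, ihL, vertRow_cons]
          simp
        · show cstep (r0 ++ "" :: rest) (l, r0.length) ::
              carryUpd (ls.zipIdx (r0.length + 1)) (r0 ++ "" :: rest) = _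
          rw [h2, ihC, vertRow_cons]
          simp [List.zipIdx_cons]
      · have h1 : hstep (r0 ++ f :: rest) (l, r0.length) = r0 ++ f :: rest := by
          simp [hstep, hc]
        have h2 : cstep (r0 ++ f :: rest) (l, r0.length) = (f, r0.length) := by
          simp [cstep, hc]
        have ihB := ih (r0.length + 1) (r0 ++ [f]) rest (by simp)
        have hrw : (r0 ++ [f]) ++ rest = r0 ++ f :: rest := by simp
        rw [hrw] at ihB
        constructor
        · show hfold (ls.zipIdx (r0.length + 1)) (hstep (r0 ++ f :: rest) (l, r0.length)) = _
          rw [h1, ihB.1, vertRow_cons]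
          simp [hc]
        · show cstep (r0 ++ f :: rest) (l, r0.length) ::
              carryUpd (ls.zipIdx (r0.length + 1)) (r0 ++ f :: rest) = _
          rw [h2, ihB.2, vertRow_cons]
          simp [hc, List.zipIdx_cons]

-- A's whole column loop (with per-column initial carries cl) = B's row pass
theorem applyCols_eq_mid (M : List (List String)) (cl : List String) :
    applyCols (cl.zipIdx 0) M = mid M cl := by
  induction M generalizing cl with
  | nil => exact applyCols_nil _
  | cons r M ih =>
    rw [applyCols_cons _ _ _ (zipIdx_pairwise cl 0)]
    have h := zip_step cl 0 [] r rfl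
    simp only [List.nil_append] at h
    rw [h.1, h.2, ih]
    rfl

-- A's port's range-fold is applyCols over the zipIdx of the all-"" carry list
theorem range_fold_eq_applyCols (w : Nat) (M : List (List String)) :
    (List.range w).foldl (fun m col => fillColumn "" col m) M =
      applyCols ((List.replicate w "").zipIdx 0) M := by
  have hz : ∀ (n i : Nat), (List.replicate n ("" : String)).zipIdx i =
      (List.range' i n).map (fun c => (("" : String), c)) := by
    intro n
    induction n with
    | zero => intro i; simp
    | succ n ih => intro i; simp [List.replicate_succ, List.zipIdx_cons, List.range'_succ, ih]
  rw [hz, applyCols, List.foldl_map, List.range_eq_range']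

-- B's port's fold with accumulator = mid of the hfilled rows
theorem foldB (rows : List (List String)) (width : Int) (acc : List (List String)) (cl : List String) :
    (rows.foldl (fun (p : List (List String) × List String) row =>
        let filled := hfillRow width row
        let r := vertRow filled p.2
        (p.1 ++ [r.1], r.2)) (acc, cl)).1 = acc ++ mid (rows.map (hfillRow width)) cl := by
  induction rows generalizing acc cl with
  | nil => simp [mid]
  | cons r rows ih => simp [List.foldl_cons, ih, mid]

-- ===== VERDICT (by name: the statement is the Claim_ definition above) =====
theorem fill_header_matrix_py_spec : Claim_equal_fill_header_matrix_py := by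
  intro rows width _
  unfold Spec_fill_header_matrix_py fill_header_matrix_py fill_header_matrix_py_alt
  have hmax : (max width 0).toNat = width.toNat := by omega
  rw [foldB, hmax, List.nil_append, range_fold_eq_applyCols, applyCols_eq_mid]
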